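-- pv_equiv track=rewrite | github.com/stella-etoile/wordle-solver | octordle.py | singleton_candidates
-- ===== SOURCE A (Python) =====
-- def singleton_candidates(cands_list, active):
--     word_to_boards = {}
--     for i in range(len(cands_list)):
--         if not active[i]:
--             continue
--         c = cands_list[i]
--         if len(c) == 1:
--             w = c[0]
--             if w not in word_to_boards:
--                 word_to_boards[w] = []
--             word_to_boards[w].append(i)
--     items = [(w, boards) for w, boards in word_to_boards.items()]
--     items.sort(key=lambda x: (len(x[1]), x[0]), reverse=True)
--     return items
-- ===== SOURCE B (Python) =====
-- from itertools import groupby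
--
--
-- def singleton_candidates(cands_list, active):
--     # flat (word, board) pairs for every active singleton candidate set
--     pairs = [(c[0], i) for i, c in enumerate(cands_list) if active[i] and len(c) == 1]
--     # sort the pairs (lexicographically: by word, then board index),
--     # then collapse equal-word runs with groupby
--     pairs.sort()
--     items = [(w, [i for _, i in grp]) for w, grp in groupby(pairs, key=lambda p: p[0])]
--     items.sort(key=lambda x: (len(x[1]), x[0]), reverse=True)
--     return items
-- ===== Notes on version B (the rewrite author's own statement) =====
-- stated objective: idiomatic
-- what changed: Replaces A's dict-insertion grouping pass with the itertools idiom: build flat (word, index) pairs, sort them (tuple-lex), collapse equal-word runs with groupby, then apply the same final sort.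
import Mathlib
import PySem

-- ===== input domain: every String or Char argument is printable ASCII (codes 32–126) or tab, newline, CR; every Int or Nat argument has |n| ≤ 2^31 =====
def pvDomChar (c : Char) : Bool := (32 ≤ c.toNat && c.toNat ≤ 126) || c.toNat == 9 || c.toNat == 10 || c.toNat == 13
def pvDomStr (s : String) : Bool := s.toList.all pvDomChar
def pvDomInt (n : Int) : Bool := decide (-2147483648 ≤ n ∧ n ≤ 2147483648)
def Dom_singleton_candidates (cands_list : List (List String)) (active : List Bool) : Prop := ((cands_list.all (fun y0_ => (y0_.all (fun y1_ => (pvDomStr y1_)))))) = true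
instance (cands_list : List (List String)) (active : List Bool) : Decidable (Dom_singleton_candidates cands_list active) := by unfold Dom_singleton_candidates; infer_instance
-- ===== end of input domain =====

-- B replaces A's dict-grouping pass with sort-pairs + groupby (itertools style); objective: idiomatic, same cost.

-- ===== PORT A =====
def singleton_candidates (cands_list : List (List String)) (active : List Bool) : List (String × List Int) :=
  let word_to_boards : PySem.Dict String (List Int) :=
    (PySem.List.pyRange 0 (cands_list.length) 1).foldl (fun d i =>
      -- active[i]: IndexError when i ≥ len(active) — excluded by Pre_; pyGetD never hits its default inside Pre_
      if !(PySem.List.pyGetD active i false) then d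
      else
        let c := PySem.List.pyGetD cands_list i []   -- c = cands_list[i]; i always in range
        if c.length == 1 then
          let w := c.headI                           -- w = c[0]; safe: len(c) == 1
          let d' := if d.contains w then d else d.insert w []
          d'.insert w (d'.getD w [] ++ [i])          -- word_to_boards[w].append(i)
        else d) PySem.Dict.empty
  let items := word_to_boards.items
  PySem.List.sorted2 items (fun x => (x.2.length : Int)) (fun x => x.1) true

-- ===== PORT B =====
-- itertools.groupby over a list sorted by its key: collapse maximal runs of equal words
def groupRuns : List (String × Int) → List (String × List Int)
  | [] => []
  | (w, i) :: rest =>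
    (w, i :: (rest.takeWhile (fun p => p.1 == w)).map (·.2)) ::
      groupRuns (rest.dropWhile (fun p => p.1 == w))
termination_by l => l.length
decreasing_by
  have := List.length_dropWhile_le (fun p => p.1 == w) rest
  simp; omega

def singleton_candidates_alt (cands_list : List (List String)) (active : List Bool) : List (String × List Int) :=
  -- active[i]: IndexError when i ≥ len(active) — excluded by Pre_; pyGetD never hits its default inside Pre_
  let pairs := ((PySem.List.enumerate cands_list).filter (fun p =>
      PySem.List.pyGetD active p.1 false && p.2.length == 1)).map (fun p => (p.2.headI, p.1))
  let sortedPairs := PySem.List.sorted2 pairs (fun p => p.1) (fun p => p.2) false  -- pairs.sort(): tuple-lex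
  let items := groupRuns sortedPairs
  PySem.List.sorted2 items (fun x => (x.2.length : Int)) (fun x => x.1) true

-- ===== PRECONDITION & SPEC =====
-- Pre_ excludes exactly the inputs where active is shorter than cands_list: there active[i] raises IndexError in both Pythons.
def Pre_singleton_candidates (cands_list : List (List String)) (active : List Bool) : Prop :=
  cands_list.length ≤ active.length
instance (cands_list : List (List String)) (active : List Bool) : Decidable (Pre_singleton_candidates cands_list active) := by unfold Pre_singleton_candidates; infer_instance
def pvWitness_singleton_candidates : List (List String) × List Bool := ([["cat"], ["up", "ox"], ["cat"]], [true, true, true])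
def Spec_singleton_candidates (cands_list : List (List String)) (active : List Bool) (out : List (String × List Int)) : Prop := out = singleton_candidates_alt cands_list active
instance (cands_list : List (List String)) (active : List Bool) (out : List (String × List Int)) : Decidable (Spec_singleton_candidates cands_list active out) := by unfold Spec_singleton_candidates; infer_instance

-- ===== CLAIM (what is proved, stated in full; the proofs are below) =====
def Claim_equal_singleton_candidates : Prop := ∀ (cands_list : List (List String)) (active : List Bool), Dom_singleton_candidates cands_list active → Pre_singleton_candidates cands_list active → Spec_singleton_candidates cands_list active (singleton_candidates cands_list active)

-- ===== LEMMAS AND PROOFS =====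

theorem sorted2_eq_sorted_lex {α κ₁ κ₂ : Type} [LinearOrder κ₁] [LinearOrder κ₂]
    (xs : List α) (k1 : α → κ₁) (k2 : α → κ₂) (rev : Bool) :
    PySem.List.sorted2 xs k1 k2 rev = PySem.List.sorted xs (fun x => toLex (k1 x, k2 x)) rev := by
  have hlt : (fun a b => decide (k1 a < k1 b) || (!decide (k1 b < k1 a) && decide (k2 a < k2 b)))
      = (fun a b : α => decide ((toLex (k1 a, k2 a)) < toLex (k1 b, k2 b))) := by
    funext a b
    by_cases h1 : k1 a < k1 b
    · simp [h1, Prod.Lex.lt_iff]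
    · by_cases h2 : k1 b < k1 a
      · simp [h1, h2, Prod.Lex.lt_iff, le_of_lt, not_lt.mp h1, ne_of_gt h2]
      · have he : k1 a = k1 b := le_antisymm (not_lt.mp h2) (not_lt.mp h1)
        simp [h1, h2, he, Prod.Lex.lt_iff]
  have hlt2 : (fun a b : α => decide (k1 b < k1 a) || (!decide (k1 a < k1 b) && decide (k2 b < k2 a)))
      = (fun a b : α => decide ((toLex (k1 b, k2 b)) < toLex (k1 a, k2 a))) := by
    funext a b; exact congrFun (congrFun hlt b) a
  simp only [PySem.List.sorted2, PySem.List.sorted]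
  rw [hlt, hlt2]
def pvPairs (cands_list : List (List String)) (active : List Bool) : List (String × Int) :=
  ((PySem.List.enumerate cands_list).filter (fun p =>
      PySem.List.pyGetD active p.1 false && p.2.length == 1)).map (fun p => (p.2.headI, p.1))

theorem setdefault_append_eq_modify {κ : Type} [BEq κ] [LawfulBEq κ]
    (d : PySem.Dict κ (List Int)) (w : κ) (i : Int) :
    (let d' := if d.contains w then d else d.insert w []
     d'.insert w (d'.getD w [] ++ [i])) = d.modify w [] (· ++ [i]) := by
  by_cases hc : d.contains w
  · simp [hc, PySem.Dict.modify]
  · simp only [hc, Bool.false_eq_true, if_false]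
    rw [show (d.insert w []).getD w [] = [] from PySem.Dict.getD_insert_self d w [] []]
    rw [PySem.Dict.insert_insert_self]
    rw [PySem.Dict.modify, PySem.Dict.getD_of_not_contains]
    simpa using hc

def pvGroup (cands_list : List (List String)) (active : List Bool) : PySem.Dict String (List Int) :=
  (pvPairs cands_list active).foldl (fun d p => d.modify p.1 [] (· ++ [p.2])) PySem.Dict.empty

theorem dictA_eq (cands_list : List (List String)) (active : List Bool) :
    ((PySem.List.pyRange 0 (cands_list.length) 1).foldl (fun d i =>
      if !(PySem.List.pyGetD active i false) then d
      else
        let c := PySem.List.pyGetD cands_list i []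
        if c.length == 1 then
          let w := c.headI
          let d' := if d.contains w then d else d.insert w []
          d'.insert w (d'.getD w [] ++ [i])
        else d) PySem.Dict.empty) = pvGroup cands_list active := by
  have hstep : (fun (d : PySem.Dict String (List Int)) (i : Int) =>
      if !(PySem.List.pyGetD active i false) then d
      else
        let c := PySem.List.pyGetD cands_list i []
        if c.length == 1 then
          let w := c.headI
          let d' := if d.contains w then d else d.insert w []
          d'.insert w (d'.getD w [] ++ [i])
        else d)
      = (fun d i =>
        if (PySem.List.pyGetD active i false && (PySem.List.pyGetD cands_list i []).length == 1)
        then d.modify (PySem.List.pyGetD cands_list i []).headI [] (· ++ [i]) else d) := by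
    funext d i
    by_cases ha : PySem.List.pyGetD active i false
    · by_cases hl : (PySem.List.pyGetD cands_list i []).length == 1
      · simpa [ha, hl] using setdefault_append_eq_modify d (PySem.List.pyGetD cands_list i []).headI i
      · simp [ha, hl]
    · simp [ha]
  rw [hstep]
  have h1 : PySem.List.enumerate cands_list
      = (PySem.List.pyRange 0 (cands_list.length) 1).map
          (fun j => (j, PySem.List.pyGetD cands_list j [])) := by
    simpa [PySem.List.len] using PySem.List.enumerate_eq_map_pyRange cands_list []
  unfold pvGroup pvPairs
  rw [h1, List.foldl_map, List.foldl_filter, List.foldl_map]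
def pvBlock (cands_list : List (List String)) (active : List Bool) (w : String) : List (String × Int) :=
  (pvPairs cands_list active).filter (fun p => p.1 == w)

theorem keys_pvGroup (cands_list : List (List String)) (active : List Bool) :
    (pvGroup cands_list active).keys
      = PySem.Set.ofList ((pvPairs cands_list active).map (·.1)) := by
  unfold pvGroup
  rw [PySem.Dict.keys_foldl_modify_key (pvPairs cands_list active) (·.1) []
      (fun _ p => (· ++ [p.2])) PySem.Dict.empty]
  simp [PySem.Dict.keys_empty, PySem.Set.update_nil_left]

theorem nodup_keys_pvGroup (cands_list : List (List String)) (active : List Bool) :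
    (pvGroup cands_list active).keys.Nodup := by
  rw [keys_pvGroup]; exact PySem.Set.nodup_ofList _

theorem itemsA_eq (cands_list : List (List String)) (active : List Bool) :
    (pvGroup cands_list active).items
      = (PySem.Set.ofList ((pvPairs cands_list active).map (·.1))).map
          (fun w => (w, (pvBlock cands_list active w).map (·.2))) := by
  rw [PySem.Dict.items_eq_map_keys _ (nodup_keys_pvGroup cands_list active) []]
  rw [keys_pvGroup]
  apply List.map_congr_left
  intro w _
  unfold pvGroup pvBlock
  rw [PySem.Dict.getD_foldl_modify_append]
  simp [PySem.Dict.getD_empty]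
theorem flatMap_filter_perm {α κ : Type} [DecidableEq κ] (key : α → κ) :
    ∀ (ws : List κ) (l : List α), ws.Nodup → (∀ x ∈ l, key x ∈ ws) →
    (ws.flatMap (fun w => l.filter (fun x => key x = w))).Perm l := by
  intro ws
  induction ws with
  | nil =>
    intro l _ hsub
    cases l with
    | nil => simp
    | cons x t => exact absurd (hsub x (by simp)) (by simp)
  | cons w ws ih =>
    intro l hnd hsub
    have hndw : w ∉ ws := (List.nodup_cons.mp hnd).1
    have hnd' : ws.Nodup := (List.nodup_cons.mp hnd).2
    rw [List.flatMap_cons]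
    have hcong : ws.flatMap (fun w' => l.filter (fun x => key x = w'))
        = ws.flatMap (fun w' => (l.filter (fun x => ¬ key x = w)).filter (fun x => key x = w')) := by
      apply List.flatMap_congr  -- may not exist; fallback below
      intro w' hw'
      rw [List.filter_filter]
      apply List.filter_congr
      intro x _
      have : w' ≠ w := fun h => hndw (h ▸ hw')
      by_cases h : key x = w'
      · simp [h, this]
      · simp [h]
    rw [hcong]
    have hperm := ih (l.filter (fun x => ¬ key x = w)) hnd' (by
      intro x hx
      have hx' := List.of_mem_filter hx
      have := hsub x (List.mem_of_mem_filter hx)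
      simp at hx'
      simpa [hx'] using this)
    refine List.Perm.trans (List.Perm.append_left _ hperm) ?_
    simpa using List.filter_append_perm (fun x => key x = w) l
def pvWs (cands_list : List (List String)) (active : List Bool) : List String :=
  PySem.List.sorted (PySem.Set.ofList ((pvPairs cands_list active).map (·.1))) (fun x => x)

def pvQ (cands_list : List (List String)) (active : List Bool) : List (String × Int) :=
  (pvWs cands_list active).flatMap (pvBlock cands_list active)

theorem pairwise_snd_pvPairs (cands_list : List (List String)) (active : List Bool) :
    (pvPairs cands_list active).Pairwise (fun p q => p.2 < q.2) := by
  unfold pvPairs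
  rw [List.pairwise_map]
  exact List.Pairwise.sublist List.filter_sublist (PySem.List.pairwise_lt_enumerate cands_list 0)

theorem fst_mem_pvBlock {cands_list : List (List String)} {active : List Bool} {w : String}
    {p : String × Int} (hp : p ∈ pvBlock cands_list active w) : p.1 = w := by
  unfold pvBlock at hp
  exact beq_iff_eq.mp (List.mem_filter.mp hp).2

theorem nodup_pvWs (cands_list : List (List String)) (active : List Bool) :
    (pvWs cands_list active).Nodup := by
  unfold pvWs
  exact (PySem.List.sorted_perm _ _ _).symm.nodup (PySem.Set.nodup_ofList _)

theorem perm_pvQ (cands_list : List (List String)) (active : List Bool) :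
    (pvQ cands_list active).Perm (pvPairs cands_list active) := by
  unfold pvQ pvBlock
  have h : ∀ w, (pvPairs cands_list active).filter (fun p => p.1 == w)
      = (pvPairs cands_list active).filter (fun p => decide (p.1 = w)) := by
    intro w; apply List.filter_congr; intro x _; rw [Bool.beq_eq_decide_eq]
  have hcong : (pvWs cands_list active).flatMap (fun w => (pvPairs cands_list active).filter (fun p => p.1 == w))
      = (pvWs cands_list active).flatMap (fun w => (pvPairs cands_list active).filter (fun p => decide (p.1 = w))) := by
    apply List.flatMap_congr; intro w _; exact h w
  rw [hcong]
  apply flatMap_filter_perm (fun p : String × Int => p.1)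
  · exact nodup_pvWs cands_list active
  · intro x hx
    have hm : x.1 ∈ PySem.Set.ofList ((pvPairs cands_list active).map (·.1)) := by
      rw [PySem.Set.mem_ofList]; exact List.mem_map_of_mem hx
    show x.1 ∈ pvWs cands_list active
    unfold pvWs
    rw [PySem.List.mem_sorted]
    exact hm

theorem pairwise_lt_pvWs (cands_list : List (List String)) (active : List Bool) :
    (pvWs cands_list active).Pairwise (· < ·) :=
  PySem.List.sorted_ofList_pairwise_lt _

theorem pairwise_lex_pvQ (cands_list : List (List String)) (active : List Bool) :
    (pvQ cands_list active).Pairwise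
      (fun p q => toLex (p.1, p.2) < toLex (q.1, q.2)) := by
  unfold pvQ
  rw [List.pairwise_flatMap]
  constructor
  · intro w _
    have hpw : (pvBlock cands_list active w).Pairwise (fun p q => p.2 < q.2) :=
      List.Pairwise.sublist List.filter_sublist (pairwise_snd_pvPairs cands_list active)
    refine hpw.imp_of_mem ?_
    intro p q hp hq hlt
    rw [Prod.Lex.lt_iff]
    right
    refine ⟨?_, by simpa using hlt⟩
    simp [fst_mem_pvBlock hp, fst_mem_pvBlock hq]
  · refine (pairwise_lt_pvWs cands_list active).imp_of_mem ?_
    intro w1 w2 _ _ hlt p hp q hq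
    rw [Prod.Lex.lt_iff]
    left
    simpa [fst_mem_pvBlock hp, fst_mem_pvBlock hq] using hlt
theorem takeWhile_append_of_all {α : Type} (p : α → Bool) (l₁ l₂ : List α)
    (h : ∀ x ∈ l₁, p x = true) : (l₁ ++ l₂).takeWhile p = l₁ ++ l₂.takeWhile p := by
  induction l₁ with
  | nil => simp
  | cons a t ih =>
    simp only [List.cons_append, List.takeWhile_cons, h a (by simp), if_true]
    rw [ih (fun x hx => h x (by simp [hx]))]

theorem dropWhile_append_of_all {α : Type} (p : α → Bool) (l₁ l₂ : List α)
    (h : ∀ x ∈ l₁, p x = true) : (l₁ ++ l₂).dropWhile p = l₂.dropWhile p := by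
  induction l₁ with
  | nil => simp
  | cons a t ih =>
    simp only [List.cons_append, List.dropWhile_cons, h a (by simp), if_true]
    exact ih (fun x hx => h x (by simp [hx]))

theorem takeWhile_eq_nil_of_all {α : Type} (p : α → Bool) (l : List α)
    (h : ∀ x ∈ l, p x = false) : l.takeWhile p = [] := by
  cases l with
  | nil => rfl
  | cons a t => simp [List.takeWhile_cons, h a (by simp)]

theorem dropWhile_eq_self_of_all {α : Type} (p : α → Bool) (l : List α)
    (h : ∀ x ∈ l, p x = false) : l.dropWhile p = l := by
  cases l with
  | nil => rfl
  | cons a t => simp [List.dropWhile_cons, h a (by simp)]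

theorem groupRuns_flat : ∀ (ws : List String) (blocks : String → List (String × Int)),
    (∀ w ∈ ws, blocks w ≠ []) → (∀ w ∈ ws, ∀ p ∈ blocks w, p.1 = w) → ws.Nodup →
    groupRuns (ws.flatMap blocks) = ws.map (fun w => (w, (blocks w).map (·.2))) := by
  intro ws
  induction ws with
  | nil => intro _ _ _ _; simp [groupRuns]
  | cons w ws ih =>
    intro blocks hne hfst hnd
    have hwmem : w ∈ w :: ws := by simp
    obtain ⟨q, t, hb⟩ : ∃ q t, blocks w = q :: t := by
      cases hbw : blocks w with
      | nil => exact absurd hbw (hne w hwmem)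
      | cons q t => exact ⟨q, t, rfl⟩
    obtain ⟨qw, qi⟩ := q
    have hqw : qw = w := hfst w hwmem (qw, qi) (by rw [hb]; simp)
    have htw : ∀ x ∈ t, (x.1 == w) = true := by
      intro x hx
      rw [beq_iff_eq]
      exact hfst w hwmem x (by rw [hb]; simp [hx])
    have hrest : ∀ x ∈ ws.flatMap blocks, (x.1 == w) = false := by
      intro x hx
      obtain ⟨w', hw', hxw'⟩ := List.mem_flatMap.mp hx
      have : x.1 = w' := hfst w' (by simp [hw']) x hxw'
      rw [beq_eq_false_iff_ne, this]
      intro he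
      exact (List.nodup_cons.mp hnd).1 (he ▸ hw')
    rw [List.flatMap_cons, hb, hqw]
    rw [show ((w, qi) :: t) ++ ws.flatMap blocks = (w, qi) :: (t ++ ws.flatMap blocks) from rfl]
    rw [groupRuns]
    rw [takeWhile_append_of_all _ t _ htw, dropWhile_append_of_all _ t _ htw]
    rw [takeWhile_eq_nil_of_all _ _ hrest, dropWhile_eq_self_of_all _ _ hrest]
    rw [ih blocks (fun u hu => hne u (by simp [hu])) (fun u hu => hfst u (by simp [hu]))
        (List.nodup_cons.mp hnd).2]
    simp [hb, hqw]
theorem itemsB_eq (cands_list : List (List String)) (active : List Bool) :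
    groupRuns (PySem.List.sorted2 (pvPairs cands_list active) (fun p => p.1) (fun p => p.2) false)
      = (pvWs cands_list active).map (fun w => (w, (pvBlock cands_list active w).map (·.2))) := by
  rw [sorted2_eq_sorted_lex]
  rw [PySem.List.sorted_eq_of_perm_of_pairwise_lt (pvPairs cands_list active)
      (pvQ cands_list active) _ (perm_pvQ cands_list active) (pairwise_lex_pvQ cands_list active)]
  exact groupRuns_flat (pvWs cands_list active) (pvBlock cands_list active)
    (by
      intro w hw
      unfold pvWs at hw
      rw [PySem.List.mem_sorted] at hw
      have := hw
      rw [PySem.Set.mem_ofList] at this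
      obtain ⟨p, hp, hpw⟩ := List.mem_map.mp this
      apply List.ne_nil_of_mem (a := p)
      unfold pvBlock
      rw [List.mem_filter]
      exact ⟨hp, by simp [hpw]⟩)
    (fun w _ p hp => fst_mem_pvBlock hp)
    (nodup_pvWs cands_list active)

theorem main_eq (cands_list : List (List String)) (active : List Bool) :
    singleton_candidates cands_list active = singleton_candidates_alt cands_list active := by
  show PySem.List.sorted2 _ _ _ true = PySem.List.sorted2 _ _ _ true
  rw [dictA_eq cands_list active]
  rw [show ((PySem.List.enumerate cands_list).filter (fun p =>
      PySem.List.pyGetD active p.1 false && p.2.length == 1)).map (fun p => (p.2.headI, p.1))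
      = pvPairs cands_list active from rfl]
  rw [itemsB_eq, itemsA_eq]
  rw [sorted2_eq_sorted_lex, sorted2_eq_sorted_lex]
  set F := fun w => (w, (pvBlock cands_list active w).map (·.2)) with hF
  set key := fun x : String × List Int => toLex ((x.2.length : Int), x.1) with hkey
  have hpermW : (pvWs cands_list active).Perm
      (PySem.Set.ofList ((pvPairs cands_list active).map (·.1))) := by
    unfold pvWs; exact PySem.List.sorted_perm _ _ _
  have hpermI : ((pvWs cands_list active).map F).Perm
      ((PySem.Set.ofList ((pvPairs cands_list active).map (·.1))).map F) := hpermW.map F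
  have hfstne : ((pvWs cands_list active).map F).Pairwise (fun a b => a.1 ≠ b.1) := by
    rw [List.pairwise_map]
    exact (nodup_pvWs cands_list active).imp (fun h => by simpa [hF] using h)
  have hsp := PySem.List.sorted_perm ((pvWs cands_list active).map F) key true
  have hfstne' : (PySem.List.sorted ((pvWs cands_list active).map F) key true).Pairwise
      (fun a b => a.1 ≠ b.1) := by
    exact (List.Perm.pairwise_iff (fun {a b} h => (h ∘ Eq.symm)) hsp).mpr hfstne
  have hle := PySem.List.sorted_pairwise_rev ((pvWs cands_list active).map F) key
  apply PySem.List.sorted_rev_eq_of_perm_of_pairwise_gt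
  · exact hsp.trans hpermI
  · refine (hle.and hfstne').imp ?_
    intro a b ⟨h1, h2⟩
    apply lt_of_le_of_ne h1
    intro he
    apply h2
    have := congrArg (fun x => (ofLex x).2) he
    simpa [hkey] using this.symm

-- ===== VERDICT (by name: the statement is the Claim_ definition above) =====
theorem singleton_candidates_spec : Claim_equal_singleton_candidates := by
  intro cands_list active _ _
  unfold Spec_singleton_candidates
  exact main_eq cands_list active
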